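-- pv_equiv track=rewrite | github.com/jonathantsang/CompetitiveProgramming | leetcode/contest/2020/189/2.py | arrangeWords
-- ===== SOURCE A (Python) =====
-- def arrangeWords(text: str) -> str:
--     text = text.split(' ')
--     text[0] = text[0][0].lower() + text[0][1:]
--     words = []
--     for i, w in enumerate(text):
--         words.append((len(w), i, w))
--     words.sort()
--     ans = []
--     for w in words:
--         ans.append(w[2])
--     ans[0] = ans[0][0].upper() + ans[0][1:]
--     return " ".join(ans)
-- ===== SOURCE B (Python) =====
-- def arrangeWords(text: str) -> str:
--     words = text.split(' ')
--     words = [words[0][0].lower() + words[0][1:]] + words[1:]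
--     lens = [len(w) for w in words]
--     res = ""
--     for L in range(min(lens), max(lens) + 1):
--         for w in words:
--             if len(w) == L:
--                 if res:
--                     res = res + " " + w
--                 else:
--                     res = w[0].upper() + w[1:]
--     return res
-- ===== Notes on version B (the rewrite author's own statement) =====
-- stated objective: alternative
-- what changed: Replaces A's decorate-sort-undecorate (build (len, index, word) triples, sort, project, set-index capitalization, join) with a single sweep over the length range min..max that emits each word of the current length in scan order while building the result string directly, capitalizing when the accumulator is still empty.
import Mathlib
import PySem

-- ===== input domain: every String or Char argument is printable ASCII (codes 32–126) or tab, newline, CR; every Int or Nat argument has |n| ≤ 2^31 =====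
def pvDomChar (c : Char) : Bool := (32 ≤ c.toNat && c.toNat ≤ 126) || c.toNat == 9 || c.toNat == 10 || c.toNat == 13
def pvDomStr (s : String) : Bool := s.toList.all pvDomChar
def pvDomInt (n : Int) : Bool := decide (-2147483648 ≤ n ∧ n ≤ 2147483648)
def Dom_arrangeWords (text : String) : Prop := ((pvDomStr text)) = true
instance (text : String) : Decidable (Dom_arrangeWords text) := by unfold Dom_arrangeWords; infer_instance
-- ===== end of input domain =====

-- B drops A's decorate-sort-undecorate entirely: it sweeps the length range min..max once,
-- emitting each word of the current length in scan order, and builds the result string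
-- directly (capitalizing when the accumulator is still empty) instead of join-after-set.

-- ===== PORT A =====
-- A-side: text[0] = text[0][0].lower() + text[0][1:]  (text[0][0] raises IndexError on an
-- empty first word; the `none` branch is unreachable under Pre_)
def pvA_decap (w : List Char) : List Char :=
  (match PySem.List.pyGet? w 0 with
   | some c => [PySem.Chars.lowerChar c]
   | none => []) ++ PySem.List.slice w (some 1) none

-- A-side: ans[0] = ans[0][0].upper() + ans[0][1:]  (same IndexError remark)
def pvA_cap (w : List Char) : List Char :=
  (match PySem.List.pyGet? w 0 with
   | some c => [PySem.Chars.upperChar c]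
   | none => []) ++ PySem.List.slice w (some 1) none

def arrangeWords (text : String) : String :=
  let text1 := PySem.Chars.splitOn text.toList [' ']
  let text2 := text1.set 0 (pvA_decap ((PySem.List.pyGet? text1 0).getD []))
  let words := (PySem.List.enumerate text2 0).foldl
      (fun acc p => acc ++ [(PySem.Chars.len p.2, p.1, p.2)]) []
  -- words.sort(): tuples compare lexicographically; the second components (indices) are
  -- pairwise distinct, so the third component is never compared — sorted2 on (len, i) is exact
  let sortedWords := PySem.List.sorted2 words (fun t => t.1) (fun t => t.2.1)
  let ans := sortedWords.foldl (fun acc t => acc ++ [t.2.2]) []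
  let ans2 := ans.set 0 (pvA_cap ((PySem.List.pyGet? ans 0).getD []))
  String.mk (PySem.Chars.join [' '] ans2)

-- ===== PORT B =====
-- B-side: words[0][0].lower() + words[0][1:] on a nonempty word (an empty word would raise
-- IndexError in Python; the [] branch is unreachable under Pre_)
def pvLowerHead (w : List Char) : List Char :=
  match w with
  | [] => []
  | c :: cs => PySem.Chars.lowerChar c :: cs

-- B-side: w[0].upper() + w[1:], same remark
def pvUpperHead (w : List Char) : List Char :=
  match w with
  | [] => []
  | c :: cs => PySem.Chars.upperChar c :: cs

def arrangeWords_alt (text : String) : String :=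
  let ws0 := PySem.Chars.splitOn text.toList [' ']
  -- [words[0][0].lower() + words[0][1:]] + words[1:]  (ws0 = [] would raise; unreachable)
  let words := match ws0 with
    | [] => []
    | f :: rest => pvLowerHead f :: rest
  let lens := words.map PySem.Chars.len
  -- min(lens)/max(lens); lens is nonempty under Pre_, so the defaults are never read
  let mn := (PySem.List.min? lens (fun x => x)).getD 0
  let mx := (PySem.List.max? lens (fun x => x)).getD 0
  let res := (PySem.List.pyRange mn (mx + 1) 1).foldl
    (fun res L => words.foldl
      (fun res w =>
        if PySem.Chars.len w == L then
          if res.isEmpty then pvUpperHead w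
          else res ++ ' ' :: w
        else res) res) ([] : List Char)
  String.mk res

-- ===== PRECONDITION & SPEC =====
-- Pre_ excludes exactly the inputs on which A raises IndexError: those whose space-split
-- contains an empty word (empty text, leading/trailing space, or a double space).
def Pre_arrangeWords (text : String) : Prop :=
  ∀ w ∈ PySem.Chars.splitOn text.toList [' '], w ≠ []
instance (text : String) : Decidable (Pre_arrangeWords text) := by
  unfold Pre_arrangeWords; infer_instance

def pvWitness_arrangeWords : String := "Leetcode is cool"

def Spec_arrangeWords (text : String) (out : String) : Prop := out = arrangeWords_alt text
instance (text : String) (out : String) : Decidable (Spec_arrangeWords text out) := by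
  unfold Spec_arrangeWords; infer_instance

-- ===== CLAIM (what is proved, stated in full; the proofs are below) =====
def Claim_equal_arrangeWords : Prop := ∀ (text : String), Dom_arrangeWords text → Pre_arrangeWords text → Spec_arrangeWords text (arrangeWords text)

-- ===== LEMMAS AND PROOFS =====

-- append-one-element foldl is map
lemma pv_foldl_append_one {α β : Type} (f : α → β) (l : List α) (acc : List β) :
    l.foldl (fun acc x => acc ++ [f x]) acc = acc ++ l.map f := by
  induction l generalizing acc with
  | nil => simp
  | cons x t ih => simp [List.foldl_cons, ih]

lemma pv_sorted2_eq_sorted_toLex {α : Type} (xs : List α) (k1 k2 : α → Int) :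
    PySem.List.sorted2 xs k1 k2 =
      PySem.List.sorted xs (fun a => toLex (k1 a, k2 a)) := by
  unfold PySem.List.sorted2 PySem.List.sorted
  simp only [if_neg (by decide : ¬ (false = true))]
  congr 1
  funext acc x
  congr 1
  funext a b
  by_cases h1 : k1 a < k1 b
  · simp [h1, Prod.Lex.lt_iff]
  · by_cases h2 : k1 b < k1 a
    · simp [h1, h2, Prod.Lex.lt_iff]
      omega
    · have he : k1 a = k1 b := le_antisymm (not_lt.mp h2) (not_lt.mp h1)
      simp [Prod.Lex.lt_iff, he]

lemma pv_go_ne_nil (sep : List Char) (fuel : Nat) (l cur : List Char) (acc : List (List Char)) :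
    PySem.Chars.splitOn.go sep fuel l cur acc ≠ [] := by
  induction fuel generalizing l cur acc with
  | zero => rw [PySem.Chars.splitOn.go.eq_def]; simp
  | succ n ih =>
    rw [PySem.Chars.splitOn.go.eq_def]
    cases l with
    | nil => simp
    | cons c rest =>
      simp only
      split_ifs with h
      · exact ih _ _ _
      · exact ih _ _ _

lemma pv_splitOn_ne_nil (cs sep : List Char) : PySem.Chars.splitOn cs sep ≠ [] := by
  unfold PySem.Chars.splitOn
  exact pv_go_ne_nil _ _ _ _ _

lemma pv_count_flatMap_filter {α κ : Type} [DecidableEq α] [DecidableEq κ]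
    (key : α → κ) (ts : List α) (ks : List κ) (hnd : ks.Nodup) (a : α) :
    (ks.flatMap fun k => ts.filter (fun t => key t == k)).count a =
      if key a ∈ ks then ts.count a else 0 := by
  induction ks with
  | nil => simp
  | cons k t ih =>
    rw [List.flatMap_cons, List.count_append, ih (List.nodup_cons.mp hnd).2]
    by_cases hk : key a = k
    · have h1 : (ts.filter (fun t => key t == k)).count a = ts.count a :=
        List.count_filter (by simp [hk])
      have h2 : key a ∉ t := hk ▸ (List.nodup_cons.mp hnd).1
      rw [if_neg h2, if_pos (List.mem_cons.mpr (Or.inl hk)), h1]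
      omega
    · have h1 : (ts.filter (fun t => key t == k)).count a = 0 := by
        rw [List.count_eq_zero]
        intro hmem
        exact hk (by simpa using (List.mem_filter.mp hmem).2)
      simp [h1, List.mem_cons, hk]

lemma pv_perm_flatMap_filter {α κ : Type} [DecidableEq α] [DecidableEq κ]
    (key : α → κ) (ts : List α) (ks : List κ) (hnd : ks.Nodup)
    (hall : ∀ t ∈ ts, key t ∈ ks) :
    (ks.flatMap fun k => ts.filter (fun t => key t == k)).Perm ts := by
  rw [List.perm_iff_count]
  intro a
  rw [pv_count_flatMap_filter key ts ks hnd a]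
  by_cases h : key a ∈ ks
  · simp [h]
  · have ha : a ∉ ts := fun hmem => h (hall a hmem)
    simp [h, List.count_eq_zero.mpr ha]

lemma pv_pairwise_flatMap_filter {α : Type} (k1 k2 : α → Int) (ts : List α) (ks : List Int)
    (hks : ks.Pairwise (· < ·)) (hts : ts.Pairwise (fun a b => k2 a < k2 b)) :
    (ks.flatMap fun k => ts.filter (fun t => k1 t == k)).Pairwise
      (fun a b => toLex (k1 a, k2 a) < toLex (k1 b, k2 b)) := by
  induction ks with
  | nil => simp
  | cons k t ih =>
    rw [List.flatMap_cons, List.pairwise_append]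
    refine ⟨?_, ih (List.pairwise_cons.mp hks).2, ?_⟩
    · rw [List.pairwise_filter]
      refine List.Pairwise.imp ?_ hts
      intro a b hab ha hb
      have ha' : k1 a = k := by simpa using ha
      have hb' : k1 b = k := by simpa using hb
      rw [Prod.Lex.lt_iff]
      right
      exact ⟨by simp [ha', hb'], hab⟩
    · intro a ha b hb
      have ha' : k1 a = k := by simpa using (List.mem_filter.mp ha).2
      obtain ⟨k', hk', hb'⟩ := List.mem_flatMap.mp hb
      have hb1 : k1 b = k' := by simpa using (List.mem_filter.mp hb').2
      have hkk : k < k' := (List.pairwise_cons.mp hks).1 k' hk'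
      rw [Prod.Lex.lt_iff]
      left
      simp [ha', hb1]
      omega

-- guarded fold = fold over the filtered list
lemma pv_foldl_if_filter {α β : Type} (p : α → Bool) (g : β → α → β) (l : List α) (acc : β) :
    l.foldl (fun acc x => if p x then g acc x else acc) acc = (l.filter p).foldl g acc := by
  induction l generalizing acc with
  | nil => rfl
  | cons x t ih =>
    by_cases h : p x <;> simp [List.foldl_cons, h, ih]

-- nested fold = fold over flatMap
lemma pv_foldl_flatMap {α β γ : Type} (f : α → List γ) (g : β → γ → β)
    (ks : List α) (acc : β) :
    ks.foldl (fun acc k => (f k).foldl g acc) acc = (ks.flatMap f).foldl g acc := by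
  induction ks generalizing acc with
  | nil => rfl
  | cons k t ih => simp [List.foldl_cons, List.flatMap_cons, List.foldl_append, ih]

-- main: A's stable sort by length = one sweep of the length range min..max picking by filter
lemma pv_main (ws : List (List Char)) (hne : ws ≠ []) :
    (PySem.List.sorted2
        ((PySem.List.enumerate ws 0).foldl
          (fun acc p => acc ++ [(PySem.Chars.len p.2, p.1, p.2)]) [])
        (fun t => t.1) (fun t => t.2.1)).foldl (fun acc t => acc ++ [t.2.2]) []
    =
    (PySem.List.pyRange
        ((PySem.List.min? (ws.map PySem.Chars.len) (fun x => x)).getD 0)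
        (((PySem.List.max? (ws.map PySem.Chars.len) (fun x => x)).getD 0) + 1) 1).flatMap
      (fun L => ws.filter (fun w => PySem.Chars.len w == L)) := by
  obtain ⟨mn, hmn⟩ : ∃ m, PySem.List.min? (ws.map PySem.Chars.len) (fun x => x) = some m := by
    cases h : PySem.List.min? (ws.map PySem.Chars.len) (fun x => x) with
    | none => exact absurd (by simpa using (PySem.List.min?_eq_none_iff _ _).mp h) hne
    | some m => exact ⟨m, rfl⟩
  obtain ⟨mx, hmx⟩ : ∃ m, PySem.List.max? (ws.map PySem.Chars.len) (fun x => x) = some m := by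
    cases h : PySem.List.max? (ws.map PySem.Chars.len) (fun x => x) with
    | none => exact absurd (by simpa using (PySem.List.max?_eq_none_iff _ _).mp h) hne
    | some m => exact ⟨m, rfl⟩
  rw [hmn, hmx]
  simp only [Option.getD_some, pv_foldl_append_one, List.nil_append,
    pv_sorted2_eq_sorted_toLex]
  have hks_pair : (PySem.List.pyRange mn (mx + 1) 1).Pairwise (· < ·) :=
    PySem.List.pairwise_lt_pyRange_one mn (mx + 1)
  have hnd : (PySem.List.pyRange mn (mx + 1) 1).Nodup :=
    hks_pair.imp (fun h => ne_of_lt h)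
  have hall : ∀ t ∈ (PySem.List.enumerate ws 0).map
      (fun p => (PySem.Chars.len p.2, p.1, p.2)),
      t.1 ∈ PySem.List.pyRange mn (mx + 1) 1 := by
    intro t ht
    obtain ⟨p, hp, rfl⟩ := List.mem_map.mp ht
    have hw : p.2 ∈ ws := by
      have h := List.mem_map_of_mem (f := fun q : Int × List Char => q.2) hp
      rwa [PySem.List.map_snd_enumerate] at h
    have hlen : PySem.Chars.len p.2 ∈ ws.map PySem.Chars.len := List.mem_map_of_mem hw
    have h1 := PySem.List.min?_isMin hmn _ hlen
    have h2 := PySem.List.max?_isMax hmx _ hlen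
    rw [PySem.List.mem_pyRange_one]
    exact ⟨h1, by omega⟩
  have hts2 : ((PySem.List.enumerate ws 0).map
      (fun p => (PySem.Chars.len p.2, p.1, p.2))).Pairwise
      (fun a b => a.2.1 < b.2.1) := by
    rw [List.pairwise_map]
    exact PySem.List.pairwise_lt_enumerate ws 0
  have hperm := pv_perm_flatMap_filter (fun t => t.1)
    ((PySem.List.enumerate ws 0).map (fun p => (PySem.Chars.len p.2, p.1, p.2)))
    (PySem.List.pyRange mn (mx + 1) 1) hnd hall
  have hpair := pv_pairwise_flatMap_filter (fun t => t.1) (fun t => t.2.1)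
    ((PySem.List.enumerate ws 0).map (fun p => (PySem.Chars.len p.2, p.1, p.2)))
    (PySem.List.pyRange mn (mx + 1) 1) hks_pair hts2
  rw [PySem.List.sorted_eq_of_perm_of_pairwise_lt _ _ _ hperm hpair, List.map_flatMap]
  congr 1
  funext k
  rw [List.filter_map, List.map_map]
  conv_rhs => rw [← PySem.List.map_snd_enumerate ws 0, List.filter_map]
  rfl

lemma pv_pyGet0 {α : Type} (x : α) (l : List α) : PySem.List.pyGet? (x :: l) 0 = some x := by
  simp [PySem.List.pyGet?, PySem.List.pyIdx?]

-- A's decorated sorted list, projected to words, is a permutation of the word list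
lemma pv_ans_perm (ws : List (List Char)) :
    ((PySem.List.sorted2
        ((PySem.List.enumerate ws 0).foldl
          (fun acc p => acc ++ [(PySem.Chars.len p.2, p.1, p.2)]) [])
        (fun t => t.1) (fun t => t.2.1)).foldl (fun acc t => acc ++ [t.2.2]) []).Perm ws := by
  simp only [pv_foldl_append_one, List.nil_append]
  have h1 := PySem.List.sorted2_perm
    ((PySem.List.enumerate ws 0).map (fun p => (PySem.Chars.len p.2, p.1, p.2)))
    (fun t => t.1) (fun t => t.2.1) false
  have h2 := h1.map (fun t : Int × Int × List Char => t.2.2)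
  simpa [List.map_map, Function.comp_def, PySem.List.map_snd_enumerate] using h2

-- once the accumulator is nonempty the string-building fold just appends " " ++ w
lemma pv_fold_join_tail (l : List (List Char)) (acc : List Char) (hacc : acc ≠ []) :
    l.foldl (fun res w => if res.isEmpty then pvUpperHead w else res ++ ' ' :: w) acc
      = acc ++ l.flatMap (fun w => ' ' :: w) := by
  induction l generalizing acc with
  | nil => simp
  | cons w t ih =>
    rw [List.foldl_cons, if_neg (by simpa [List.isEmpty_iff] using hacc)]
    rw [ih _ (by simp)]
    simp

lemma pv_join_space (x : List Char) (xs : List (List Char)) :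
    PySem.Chars.join [' '] (x :: xs) = x ++ xs.flatMap (fun w => ' ' :: w) := by
  induction xs generalizing x with
  | nil => simp [PySem.Chars.join_singleton]
  | cons y t ih =>
    rw [PySem.Chars.join_cons_cons, ih y]
    simp

-- ===== VERDICT (by name: the statement is the Claim_ definition above) =====
theorem arrangeWords_spec : Claim_equal_arrangeWords := by
  intro text _ hpre
  unfold Spec_arrangeWords arrangeWords arrangeWords_alt
  obtain ⟨p0, rest, hp⟩ : ∃ p0 rest,
      PySem.Chars.splitOn text.toList [' '] = p0 :: rest := by
    cases h : PySem.Chars.splitOn text.toList [' '] with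
    | nil => exact absurd h (pv_splitOn_ne_nil _ _)
    | cons a l => exact ⟨a, l, rfl⟩
  have hp0 : p0 ≠ [] := hpre p0 (hp ▸ List.mem_cons_self)
  obtain ⟨c, cs, rfl⟩ : ∃ c cs, p0 = c :: cs := by
    cases p0 with
    | nil => exact absurd rfl hp0
    | cons c cs => exact ⟨c, cs, rfl⟩
  have hdecap : pvLowerHead (c :: cs) = pvA_decap (c :: cs) := by
    simp [pvLowerHead, pvA_decap, PySem.List.slice_from_one]
  simp only [hp, pv_pyGet0, Option.getD_some, List.set_cons_zero, hdecap]
  set ws : List (List Char) := pvA_decap (c :: cs) :: rest with hws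
  have hwsne : ws ≠ [] := by simp [hws]
  -- every word of ws is nonempty
  have hwsall : ∀ w ∈ ws, w ≠ [] := by
    intro w hw
    rcases List.mem_cons.mp hw with rfl | hmem
    · rw [pvA_decap, pv_pyGet0]; simp
    · exact hpre w (hp ▸ List.mem_cons_of_mem _ hmem)
  -- B's nested fold = fold of the cap-step over A's sorted word list
  simp only [pv_foldl_if_filter]
  rw [pv_foldl_flatMap, ← pv_main ws hwsne]
  set out := (PySem.List.sorted2
      ((PySem.List.enumerate ws 0).foldl
        (fun acc p => acc ++ [(PySem.Chars.len p.2, p.1, p.2)]) [])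
      (fun t => t.1) (fun t => t.2.1)).foldl (fun acc t => acc ++ [t.2.2]) [] with hout
  have hperm : out.Perm ws := pv_ans_perm ws
  obtain ⟨a0, tl, ha⟩ : ∃ a0 tl, out = a0 :: tl := by
    cases h : out with
    | nil => rw [h] at hperm; exact absurd (List.Perm.eq_nil hperm.symm) hwsne
    | cons a l => exact ⟨a, l, rfl⟩
  have ha0 : a0 ≠ [] := hwsall a0 (hperm.mem_iff.mp (ha ▸ List.mem_cons_self))
  obtain ⟨d, ds, rfl⟩ : ∃ d ds, a0 = d :: ds := by
    cases a0 with
    | nil => exact absurd rfl ha0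
    | cons d ds => exact ⟨d, ds, rfl⟩
  rw [ha, pv_pyGet0]
  simp only [Option.getD_some, List.set_cons_zero]
  rw [List.foldl_cons]
  have hfirst : (if ([] : List Char).isEmpty = true then pvUpperHead (d :: ds)
      else [] ++ ' ' :: d :: ds) = pvUpperHead (d :: ds) := rfl
  rw [hfirst]
  rw [pv_fold_join_tail tl (pvUpperHead (d :: ds)) (by simp [pvUpperHead])]
  rw [pv_join_space]
  congr 1
  simp [pvUpperHead, pvA_cap, PySem.List.slice_from_one]
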